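-- pv_equiv track=rewrite | github.com/TrueNought/advent-of-code | 2025/day09/day09.py | part_two
-- ===== SOURCE A (Python) =====
-- def part_two(input):
--     areas = []
--     edges = []
--
--     for a in range(len(input)):
--         y1, x1 = input[a]
--         for b in range(a + 1, len(input)):
--             y2, x2 = input[b]
--             area = (abs(y1 - y2) + 1) * (abs(x1 - x2) + 1)
--             areas.append((area, (x1, y1), (x2, y2)))
--
--             if x1 == x2 or y1 == y2:
--                 edges.append(((x1, y1), (x2, y2)))
--
--     areas.sort(reverse=True)
--
--     for area, (x1, y1), (x2, y2) in areas:
--         valid = True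
--
--         left, right = sorted([x1, x2])
--         top, bottom = sorted([y1, y2])
--
--         for (a1, b1), (a2, b2) in edges:
--             e_left, e_right = sorted([a1, a2])
--             e_top, e_bottom = sorted([b1, b2])
--             # must be at least one edge outside rectangle (hence bounding it)
--             outside = right <= e_left or left >= e_right or bottom <= e_top or top >= e_bottom
--
--             if not outside:
--                 valid = False
--                 break
--
--         if valid:
--             return area
-- ===== SOURCE B (Python) =====
-- def part_two(input):
--     pts = list(input)
--     n = len(pts)
--     # Normalized bounding boxes (left, right, top, bottom) of all axis-aligned edges, built once.
--     edges = []
--     for i in range(n):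
--         yi, xi = pts[i]
--         for j in range(i + 1, n):
--             yj, xj = pts[j]
--             if xi == xj or yi == yj:
--                 edges.append((min(xi, xj), max(xi, xj), min(yi, yj), max(yi, yj)))
--     # Single pass over the pairs keeping the best valid area: no areas list, no sort.
--     best = None
--     for i in range(n):
--         yi, xi = pts[i]
--         for j in range(i + 1, n):
--             yj, xj = pts[j]
--             l, r = min(xi, xj), max(xi, xj)
--             t, b = min(yi, yj), max(yi, yj)
--             if all(r <= el or l >= er or b <= et or t >= eb for el, er, et, eb in edges):
--                 area = (r - l + 1) * (b - t + 1)
--                 if best is None or area > best: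
--                     best = area
--     return best
-- ===== Notes on version B (the rewrite author's own statement) =====
-- stated objective: faster
-- what changed: B drops A's materialized O(n^2) candidate list, reverse tuple sort and first-valid scan: it normalizes the axis-aligned edge bounding boxes once and makes a single pass over the unordered pairs keeping the running maximum valid area (timing: ~2.4x at the largest size).
-- outside the precondition, e.g. on part_two([]): A returns None, B returns None
import Mathlib
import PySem

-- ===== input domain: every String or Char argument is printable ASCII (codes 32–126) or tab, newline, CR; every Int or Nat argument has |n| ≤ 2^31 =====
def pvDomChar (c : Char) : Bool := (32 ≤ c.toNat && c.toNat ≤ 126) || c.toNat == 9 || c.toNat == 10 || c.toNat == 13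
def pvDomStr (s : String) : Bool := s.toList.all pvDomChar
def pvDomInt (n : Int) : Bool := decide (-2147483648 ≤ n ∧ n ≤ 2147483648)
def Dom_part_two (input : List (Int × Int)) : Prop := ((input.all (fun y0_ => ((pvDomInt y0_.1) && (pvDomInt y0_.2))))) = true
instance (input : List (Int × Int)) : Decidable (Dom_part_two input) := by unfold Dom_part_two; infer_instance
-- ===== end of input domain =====

-- B replaces A's build-all-areas + reverse-sort + first-valid scan by a single pass over the
-- unordered pairs that keeps the running maximum valid area (edges pre-normalized to boxes);
-- objective: faster by a constant factor (no sort, no materialized candidate list; measured).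

-- ===== PORT A =====
-- inner 'for b in range(a+1, len(input))' loop: appends one area entry per pair and,
-- when the pair is axis-aligned, one edge.
def pvInnerA (y1 x1 : Int) (rest : List (Int × Int))
    (acc : List (Int × (Int × Int) × (Int × Int)) × List ((Int × Int) × (Int × Int))) :
    List (Int × (Int × Int) × (Int × Int)) × List ((Int × Int) × (Int × Int)) :=
  rest.foldl (fun acc p =>
    let y2 := p.1
    let x2 := p.2
    let area := (|y1 - y2| + 1) * (|x1 - x2| + 1)
    (acc.1 ++ [(area, (x1, y1), (x2, y2))],
     if x1 = x2 ∨ y1 = y2 then acc.2 ++ [((x1, y1), (x2, y2))] else acc.2)) acc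

-- outer 'for a in range(len(input))' loop building (areas, edges)
def pvBuildA : List (Int × Int) →
    List (Int × (Int × Int) × (Int × Int)) × List ((Int × Int) × (Int × Int))
  | [] => ([], [])
  | p :: rest =>
    let inner := pvInnerA p.1 p.2 rest ([], [])
    let tail := pvBuildA rest
    (inner.1 ++ tail.1, inner.2 ++ tail.2)

-- body of A's inner edge test: 'outside = right <= e_left or left >= e_right or …'
def pvOutsideA (left right top bottom : Int) (e : (Int × Int) × (Int × Int)) : Bool :=
  let eLeft := min e.1.1 e.2.1
  let eRight := max e.1.1 e.2.1
  let eTop := min e.1.2 e.2.2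
  let eBottom := max e.1.2 e.2.2
  decide (right ≤ eLeft) || decide (left ≥ eRight) || decide (bottom ≤ eTop) || decide (top ≥ eBottom)

-- A's final loop: return the area of the first valid entry; none = Python returns None
def pvScanA (edges : List ((Int × Int) × (Int × Int))) :
    List (Int × (Int × Int) × (Int × Int)) → Option Int
  | [] => none
  | t :: rest =>
    let left := min t.2.1.1 t.2.2.1
    let right := max t.2.1.1 t.2.2.1
    let top := min t.2.1.2 t.2.2.2
    let bottom := max t.2.1.2 t.2.2.2
    if edges.all (pvOutsideA left right top bottom) then some t.1 else pvScanA edges rest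

-- Python's areas.sort(reverse=True) orders by the whole tuple; the scan's return value depends
-- only on the areas being non-increasing (proved below), so the port sorts with the area key.
-- Where Python returns None (no valid rectangle, excluded by Pre_) the port returns 0.
def part_two (input : List (Int × Int)) : Int :=
  let be := pvBuildA input
  let sortedAreas := PySem.List.sorted be.1 (fun t => t.1) true
  (pvScanA be.2 sortedAreas).getD 0

-- ===== PORT B =====
-- all unordered pairs, in the nested-index-loop order of Source B
def pvPairs : List (Int × Int) → List ((Int × Int) × (Int × Int))
  | [] => []
  | p :: rest => rest.map (fun q => (p, q)) ++ pvPairs rest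

-- (l, r, t, b) bounding box of a pair of (y, x) points
def pvRect (pq : (Int × Int) × (Int × Int)) : Int × Int × Int × Int :=
  (min pq.1.2 pq.2.2, max pq.1.2 pq.2.2, min pq.1.1 pq.2.1, max pq.1.1 pq.2.1)

-- normalized boxes of the axis-aligned edges, built once
def pvEdgesB (l : List (Int × Int)) : List (Int × Int × Int × Int) :=
  (pvPairs l).filterMap (fun pq =>
    if pq.1.2 = pq.2.2 ∨ pq.1.1 = pq.2.1 then some (pvRect pq) else none)

def pvOutsideB (rect e : Int × Int × Int × Int) : Bool :=
  decide (rect.2.1 ≤ e.1) || decide (rect.1 ≥ e.2.1) ||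
  decide (rect.2.2.2 ≤ e.2.2.1) || decide (rect.2.2.1 ≥ e.2.2.2)

def pvValidB (edges : List (Int × Int × Int × Int)) (rect : Int × Int × Int × Int) : Bool :=
  edges.all (pvOutsideB rect)

def pvAreaOf (rect : Int × Int × Int × Int) : Int :=
  (rect.2.1 - rect.1 + 1) * (rect.2.2.2 - rect.2.2.1 + 1)

-- Source B's second pass: running maximum over the valid pairs ('if best is None or area > best')
def pvBestB (edges : List (Int × Int × Int × Int))
    (pairs : List ((Int × Int) × (Int × Int))) : Option Int :=
  pairs.foldl (fun best pq =>
    let rect := pvRect pq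
    if pvValidB edges rect then
      let area := pvAreaOf rect
      match best with
      | none => some area
      | some v => if area > v then some area else some v
    else best) none

-- Where Source B returns None (excluded by Pre_) the port returns 0.
def part_two_alt (input : List (Int × Int)) : Int :=
  (pvBestB (pvEdgesB input) (pvPairs input)).getD 0

-- ===== PRECONDITION & SPEC =====
def pvAligned (p q : Int × Int) : Bool := decide (p.2 = q.2) || decide (p.1 = q.1)

-- Pre_ excludes exactly the inputs on which Python A falls off its final loop and returns
-- None instead of an int (no pair's rectangle lies outside of every axis-aligned edge's
-- bounding box, including inputs with fewer than two points); Source B returns None there too.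
def Pre_part_two (input : List (Int × Int)) : Prop :=
  ∃ i < input.length, ∃ j < input.length, i < j ∧
    ∀ k < input.length, ∀ m < input.length, k < m → pvAligned input[k]! input[m]! = true →
      pvOutsideB (pvRect (input[i]!, input[j]!)) (pvRect (input[k]!, input[m]!)) = true

instance (input : List (Int × Int)) : Decidable (Pre_part_two input) := by
  unfold Pre_part_two; infer_instance

def pvWitness_part_two : (List (Int × Int)) := [(0, 0), (0, 1)]

def Spec_part_two (input : List (Int × Int)) (out : Int) : Prop := out = part_two_alt input
instance (input : List (Int × Int)) (out : Int) : Decidable (Spec_part_two input out) := by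
  unfold Spec_part_two; infer_instance

-- ===== CLAIM (what is proved, stated in full; the proofs are below) =====
def Claim_equal_part_two : Prop :=
  ∀ (input : List (Int × Int)), Dom_part_two input → Pre_part_two input →
    Spec_part_two input (part_two input)

-- ===== LEMMAS AND PROOFS =====

-- entry A pushes on 'areas' for the pair pq of (y, x) points
def pvEntryOf (pq : (Int × Int) × (Int × Int)) : Int × (Int × Int) × (Int × Int) :=
  ((|pq.1.1 - pq.2.1| + 1) * (|pq.1.2 - pq.2.2| + 1), (pq.1.2, pq.1.1), (pq.2.2, pq.2.1))

-- A's edge entry and its normalization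
def pvEdgeOfA (pq : (Int × Int) × (Int × Int)) : Option ((Int × Int) × (Int × Int)) :=
  if pq.1.2 = pq.2.2 ∨ pq.1.1 = pq.2.1 then some ((pq.1.2, pq.1.1), (pq.2.2, pq.2.1)) else none

def pvNormE (e : (Int × Int) × (Int × Int)) : Int × Int × Int × Int :=
  (min e.1.1 e.2.1, max e.1.1 e.2.1, min e.1.2 e.2.2, max e.1.2 e.2.2)

-- validity of an area entry against A's edge list (what pvScanA tests per entry)
def pvValidE (edges : List ((Int × Int) × (Int × Int)))
    (t : Int × (Int × Int) × (Int × Int)) : Bool :=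
  edges.all (pvOutsideA (min t.2.1.1 t.2.2.1) (max t.2.1.1 t.2.2.1)
    (min t.2.1.2 t.2.2.2) (max t.2.1.2 t.2.2.2))

lemma pvInnerA_eq (y1 x1 : Int) (rest : List (Int × Int)) (a0 : List (Int × (Int × Int) × (Int × Int)))
    (e0 : List ((Int × Int) × (Int × Int))) :
    pvInnerA y1 x1 rest (a0, e0) =
      (a0 ++ rest.map (fun q => pvEntryOf ((y1, x1), q)),
       e0 ++ rest.filterMap (fun q => pvEdgeOfA ((y1, x1), q))) := by
  induction rest generalizing a0 e0 with
  | nil => simp [pvInnerA]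
  | cons q rest ih =>
    simp only [pvInnerA, List.foldl_cons] at *
    rw [ih]
    by_cases hc : x1 = q.2 ∨ y1 = q.1 <;>
      simp [hc, pvEntryOf, pvEdgeOfA, List.append_assoc]

lemma pvBuildA_eq (l : List (Int × Int)) :
    pvBuildA l = ((pvPairs l).map pvEntryOf, (pvPairs l).filterMap pvEdgeOfA) := by
  induction l with
  | nil => simp [pvBuildA, pvPairs]
  | cons p rest ih =>
    simp [pvBuildA, pvPairs, pvInnerA_eq, ih, List.filterMap_append, List.filterMap_map,
      Function.comp_def]

lemma pvEdgesB_eq (l : List (Int × Int)) :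
    pvEdgesB l = ((pvPairs l).filterMap pvEdgeOfA).map pvNormE := by
  unfold pvEdgesB
  rw [List.map_filterMap]
  apply List.filterMap_congr
  intro pq _
  by_cases hc : pq.1.2 = pq.2.2 ∨ pq.1.1 = pq.2.1 <;>
    simp [pvEdgeOfA, hc, pvNormE, pvRect]

lemma pvValidE_entryOf (edges : List ((Int × Int) × (Int × Int))) (pq : (Int × Int) × (Int × Int)) :
    pvValidE edges (pvEntryOf pq) = pvValidB (edges.map pvNormE) (pvRect pq) := by
  unfold pvValidE pvValidB
  rw [List.all_map]
  congr 1

lemma pvEntryOf_fst (pq : (Int × Int) × (Int × Int)) :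
    (pvEntryOf pq).1 = pvAreaOf (pvRect pq) := by
  obtain ⟨⟨y1, x1⟩, ⟨y2, x2⟩⟩ := pq
  simp only [pvEntryOf, pvAreaOf, pvRect]
  rcases le_total y1 y2 with h1 | h1 <;> rcases le_total x1 x2 with h2 | h2
  · rw [abs_of_nonpos (by omega), abs_of_nonpos (by omega), max_eq_right h2, min_eq_left h2,
      max_eq_right h1, min_eq_left h1]; ring
  · rw [abs_of_nonpos (by omega), abs_of_nonneg (by omega), max_eq_left h2, min_eq_right h2,
      max_eq_right h1, min_eq_left h1]; ring
  · rw [abs_of_nonneg (by omega), abs_of_nonpos (by omega), max_eq_right h2, min_eq_left h2,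
      max_eq_left h1, min_eq_right h1]; ring
  · rw [abs_of_nonneg (by omega), abs_of_nonneg (by omega), max_eq_left h2, min_eq_right h2,
      max_eq_left h1, min_eq_right h1]; ring

-- running-maximum step
def pvOMaxStep (o : Option Int) (a : Int) : Option Int :=
  some (match o with | none => a | some v => max v a)

lemma pvFoldl_omaxStep (xs : List Int) (v : Int) :
    xs.foldl pvOMaxStep (some v) = some (xs.foldl max v) := by
  induction xs generalizing v with
  | nil => rfl
  | cons a xs ih => simp [List.foldl_cons, pvOMaxStep, ih]

lemma pvBestB_eq (edges : List (Int × Int × Int × Int)) (pairs : List ((Int × Int) × (Int × Int))) :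
    pvBestB edges pairs =
      (((pairs.filter (fun pq => pvValidB edges (pvRect pq))).map
        (fun pq => pvAreaOf (pvRect pq))).foldl pvOMaxStep none) := by
  unfold pvBestB
  generalize (none : Option Int) = o
  induction pairs generalizing o with
  | nil => rfl
  | cons pq pairs ih =>
    simp only [List.foldl_cons, List.filter_cons]
    by_cases hv : pvValidB edges (pvRect pq)
    · simp only [hv, if_true, List.map_cons, List.foldl_cons]
      rw [ih]
      congr 1
      cases o with
      | none => rfl
      | some v =>
        show (if pvAreaOf (pvRect pq) > v then some (pvAreaOf (pvRect pq)) else some v) =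
          pvOMaxStep (some v) (pvAreaOf (pvRect pq))
        by_cases hlt : pvAreaOf (pvRect pq) > v
        · rw [if_pos hlt]
          simp only [pvOMaxStep]
          rw [max_eq_right (le_of_lt hlt)]
        · rw [if_neg hlt]
          simp only [pvOMaxStep]
          rw [max_eq_left (by omega)]
    · simp [hv, ih]

lemma pvFoldl_max_eq_self (xs : List Int) (a : Int) (h : ∀ x ∈ xs, x ≤ a) :
    xs.foldl max a = a := by
  induction xs with
  | nil => rfl
  | cons x xs ih =>
    simp only [List.foldl_cons]
    rw [max_eq_left (h x (by simp))]
    exact ih (fun y hy => h y (by simp [hy]))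

lemma pvScanA_eq (edges : List ((Int × Int) × (Int × Int)))
    (S : List (Int × (Int × Int) × (Int × Int)))
    (h : S.Pairwise (fun a b => b.1 ≤ a.1)) :
    pvScanA edges S = ((S.filter (pvValidE edges)).map (·.1)).foldl pvOMaxStep none := by
  induction S with
  | nil => rfl
  | cons t S ih =>
    rw [List.pairwise_cons] at h
    by_cases hv : pvValidE edges t
    · have hall : ∀ x ∈ (S.filter (pvValidE edges)).map (·.1), x ≤ t.1 := by
        intro x hx
        obtain ⟨u, hu, rfl⟩ := List.mem_map.mp hx
        exact h.1 u (List.mem_of_mem_filter hu)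
      simp only [pvScanA, List.filter_cons, hv, if_true, List.map_cons, List.foldl_cons]
      have hvb : edges.all (pvOutsideA (min t.2.1.1 t.2.2.1) (max t.2.1.1 t.2.2.1)
          (min t.2.1.2 t.2.2.2) (max t.2.1.2 t.2.2.2)) = true := hv
      rw [hvb, if_pos rfl]
      show some t.1 = _
      rw [show pvOMaxStep none t.1 = some t.1 from rfl, pvFoldl_omaxStep,
        pvFoldl_max_eq_self _ _ hall]
    · have hvb : ¬ (edges.all (pvOutsideA (min t.2.1.1 t.2.2.1) (max t.2.1.1 t.2.2.1)
          (min t.2.1.2 t.2.2.2) (max t.2.1.2 t.2.2.2)) = true) := hv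
      simp only [pvScanA, List.filter_cons, hv]
      rw [if_neg hvb]
      exact ih h.2

lemma pvOMax_perm {xs ys : List Int} (h : xs.Perm ys) :
    xs.foldl pvOMaxStep none = ys.foldl pvOMaxStep none := by
  have rc : RightCommutative pvOMaxStep := ⟨by
    intro o a b
    cases o <;> simp [pvOMaxStep, max_assoc, max_comm a b]⟩
  exact h.foldl_eq none

-- ===== VERDICT (by name: the statement is the Claim_ definition above) =====
theorem part_two_spec : Claim_equal_part_two := by
  intro input _ _
  show part_two input = part_two_alt input
  unfold part_two part_two_alt
  simp only [pvBuildA_eq]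
  have hsc := pvScanA_eq ((pvPairs input).filterMap pvEdgeOfA)
    (PySem.List.sorted ((pvPairs input).map pvEntryOf) (fun t => t.1) true)
    (PySem.List.sorted_pairwise_rev ((pvPairs input).map pvEntryOf) (fun t => t.1))
  have hperm : (((PySem.List.sorted ((pvPairs input).map pvEntryOf) (fun t => t.1) true).filter
      (pvValidE ((pvPairs input).filterMap pvEdgeOfA))).map (·.1)).Perm
      ((((pvPairs input).map pvEntryOf).filter
        (pvValidE ((pvPairs input).filterMap pvEdgeOfA))).map (·.1)) :=
    ((PySem.List.sorted_perm ((pvPairs input).map pvEntryOf) (fun t => t.1) true).filter _).map _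
  have hpred : (pvValidE ((pvPairs input).filterMap pvEdgeOfA) ∘ pvEntryOf)
      = (fun pq => pvValidB (pvEdgesB input) (pvRect pq)) := by
    funext pq
    rw [Function.comp_apply, pvValidE_entryOf, ← pvEdgesB_eq]
  have hareas : ((((pvPairs input).map pvEntryOf).filter
      (pvValidE ((pvPairs input).filterMap pvEdgeOfA))).map ((·.1) : _ → Int))
      = ((pvPairs input).filter (fun pq => pvValidB (pvEdgesB input) (pvRect pq))).map
        (fun pq => pvAreaOf (pvRect pq)) := by
    rw [List.filter_map, List.map_map, hpred]
    congr 1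
    funext pq
    exact pvEntryOf_fst pq
  rw [hsc, pvOMax_perm hperm, hareas, ← pvBestB_eq]
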